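-- pv_equiv track=rewrite | github.com/bornkesselpascal/university | python/gdp-python/Klausurvorbereitung/Blatt 8/b.py | ordne_nach_alter
-- ===== SOURCE A (Python) =====
-- def ordne_nach_alter(personen: list[tuple[str, int]]) -> tuple[list[tuple[str, int]]]:
--     vj = list()
--     mj = list()
--
--     for entry in personen:
--         if entry[1] >= 18:
--             vj.append(entry)
--         else:
--             mj.append(entry)
--
--     vj.sort(key= lambda entry: entry[1])
--     mj.sort(key= lambda entry: entry[1])
--     return (vj, mj)
-- ===== SOURCE B (Python) =====
-- def ordne_nach_alter(personen: list[tuple[str, int]]) -> tuple[list[tuple[str, int]]]: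
--     geordnet = sorted(personen, key=lambda e: e[1])
--     vj = [e for e in geordnet if e[1] >= 18]
--     mj = [e for e in geordnet if e[1] < 18]
--     return (vj, mj)
-- ===== Notes on version B (the rewrite author's own statement) =====
-- stated objective: simpler
-- what changed: B sorts the whole list once by age up front and then splits the sorted list into adults/minors with two comprehensions, instead of A's partition-first-then-sort-each-group; stability of sorted makes the results identical.
import Mathlib
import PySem

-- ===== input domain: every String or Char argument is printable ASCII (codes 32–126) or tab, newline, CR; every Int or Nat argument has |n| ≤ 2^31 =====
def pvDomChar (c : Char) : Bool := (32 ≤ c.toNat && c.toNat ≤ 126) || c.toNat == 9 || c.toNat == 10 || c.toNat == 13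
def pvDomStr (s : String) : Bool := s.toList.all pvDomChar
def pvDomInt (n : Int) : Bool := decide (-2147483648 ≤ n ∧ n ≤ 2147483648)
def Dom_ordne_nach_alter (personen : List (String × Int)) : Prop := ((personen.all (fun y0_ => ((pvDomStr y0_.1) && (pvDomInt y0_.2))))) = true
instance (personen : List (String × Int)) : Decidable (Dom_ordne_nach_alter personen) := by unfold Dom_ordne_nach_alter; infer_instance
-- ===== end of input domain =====

-- B sorts the whole list once by age and then splits it into adults/minors in two passes,
-- instead of A's partition-first-then-sort-each-group; same cost, simpler decomposition.

-- ===== PORT A =====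
-- A: partition into vj/mj with appends, then sort each group by age (stable sort).
def ordne_nach_alter (personen : List (String × Int)) : (List (String × Int)) × (List (String × Int)) :=
  let s := personen.foldl
    (fun (s : List (String × Int) × List (String × Int)) entry =>
      if 18 ≤ entry.2 then (s.1 ++ [entry], s.2) else (s.1, s.2 ++ [entry]))
    ([], [])
  (PySem.List.sorted s.1 (fun entry => entry.2), PySem.List.sorted s.2 (fun entry => entry.2))

-- ===== PORT B =====
-- B: sort once by age, then filter the sorted list twice.
def ordne_nach_alter_alt (personen : List (String × Int)) : (List (String × Int)) × (List (String × Int)) :=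
  let geordnet := PySem.List.sorted personen (fun e => e.2)
  (geordnet.filter (fun e => decide (18 ≤ e.2)), geordnet.filter (fun e => decide (e.2 < 18)))

-- ===== PRECONDITION & SPEC =====
def Spec_ordne_nach_alter (personen : List (String × Int)) (out : (List (String × Int)) × (List (String × Int))) : Prop := out = ordne_nach_alter_alt personen
instance (personen : List (String × Int)) (out : (List (String × Int)) × (List (String × Int))) : Decidable (Spec_ordne_nach_alter personen out) := by unfold Spec_ordne_nach_alter; infer_instance

-- ===== CLAIM (what is proved, stated in full; the proofs are below) =====
def Claim_equal_ordne_nach_alter : Prop := ∀ (personen : List (String × Int)), Dom_ordne_nach_alter personen → Spec_ordne_nach_alter personen (ordne_nach_alter personen)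

-- ===== LEMMAS AND PROOFS =====

-- A's partition fold computes the two filters (with its accumulators as prefixes).
theorem pv_fold_partition :
    ∀ (xs : List (String × Int)) (a b : List (String × Int)),
      xs.foldl (fun (s : List (String × Int) × List (String × Int)) e =>
        if 18 ≤ e.2 then (s.1 ++ [e], s.2) else (s.1, s.2 ++ [e])) (a, b)
      = (a ++ xs.filter (fun e => decide (18 ≤ e.2)), b ++ xs.filter (fun e => decide (e.2 < 18))) := by
  intro xs
  induction xs with
  | nil => intro a b; simp
  | cons x t ih =>
      intro a b
      by_cases hx : (18 : Int) ≤ x.2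
      · have hx' : ¬ x.2 < 18 := by omega
        simp [List.foldl_cons, hx, hx', ih]
      · have hx' : x.2 < 18 := by omega
        simp [List.foldl_cons, hx, hx', ih]

-- filtering commutes with a single stable insertion into a key-sorted list
theorem pv_filter_insertBy {α : Type} (key : α → Int) (p : α → Bool) (x : α) :
    ∀ (ys : List α), ys.Pairwise (fun a b => key a ≤ key b) →
      (PySem.List.insertBy (fun a b => decide (key a < key b)) x ys).filter p
        = if p x then PySem.List.insertBy (fun a b => decide (key a < key b)) x (ys.filter p)
          else ys.filter p := by
  intro ys
  induction ys with
  | nil =>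
      intro _
      by_cases hx : p x = true
      · simp [PySem.List.insertBy, hx]
      · simp only [Bool.not_eq_true] at hx
        simp [PySem.List.insertBy, hx]
  | cons y t ih =>
      intro hp
      have hpt : t.Pairwise (fun a b => key a ≤ key b) := (List.pairwise_cons.mp hp).2
      have hyt : ∀ z ∈ t, key y ≤ key z := (List.pairwise_cons.mp hp).1
      by_cases hlt : key x < key y
      · -- x goes in front of y
        by_cases hx : p x = true
        · by_cases hy : p y = true
          · simp [PySem.List.insertBy, hlt, hx, hy]
          · simp only [Bool.not_eq_true] at hy
            -- LHS = x :: t.filter p; RHS = insertBy x (t.filter p); every kept z of t has key x < key z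
            have hhead : PySem.List.insertBy (fun a b => decide (key a < key b)) x (t.filter p)
                = x :: t.filter p := by
              cases hft : t.filter p with
              | nil => simp [PySem.List.insertBy]
              | cons z zs =>
                  have hz' : z ∈ List.filter p t := by simp [hft]
                  have hz : z ∈ t := List.mem_of_mem_filter hz'
                  have : key x < key z := lt_of_lt_of_le hlt (hyt z hz)
                  simp [PySem.List.insertBy, this]
            simp [PySem.List.insertBy, hlt, hx, hy, hhead]
        · simp only [Bool.not_eq_true] at hx
          simp [PySem.List.insertBy, hlt, hx]
      · -- x goes after y
        by_cases hx : p x = true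
        · by_cases hy : p y = true
          · simp [PySem.List.insertBy, hlt, hx, hy, ih hpt]
          · simp only [Bool.not_eq_true] at hy
            simp [PySem.List.insertBy, hlt, hx, hy, ih hpt]
        · simp only [Bool.not_eq_true] at hx
          by_cases hy : p y = true
          · simp [PySem.List.insertBy, hlt, hx, hy, ih hpt]
          · simp only [Bool.not_eq_true] at hy
            simp [PySem.List.insertBy, hlt, hx, hy, ih hpt]

-- filtering commutes with the whole insertion-sort fold (accumulator kept sorted)
theorem pv_filter_foldl_ins {α : Type} (key : α → Int) (p : α → Bool) :
    ∀ (xs acc : List α), acc.Pairwise (fun a b => key a ≤ key b) →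
      (xs.foldl (fun acc x => PySem.List.insertBy (fun a b => decide (key a < key b)) x acc) acc).filter p
        = (xs.filter p).foldl (fun acc x => PySem.List.insertBy (fun a b => decide (key a < key b)) x acc) (acc.filter p) := by
  intro xs
  induction xs with
  | nil => intro acc _; simp
  | cons x t ih =>
      intro acc hacc
      have hins : (acc.Pairwise (fun a b => key a ≤ key b)) →
          (PySem.List.insertBy (fun a b => decide (key a < key b)) x acc).Pairwise (fun a b => key a ≤ key b) :=
        PySem.List.insertBy_pairwise_le key x acc
      by_cases hx : p x = true
      · simp only [List.foldl_cons, List.filter_cons, hx, if_true]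
        rw [ih _ (hins hacc), pv_filter_insertBy key p x acc hacc, if_pos hx]
      · simp only [Bool.not_eq_true] at hx
        simp only [List.foldl_cons, List.filter_cons, hx, Bool.false_eq_true, if_false]
        rw [ih _ (hins hacc), pv_filter_insertBy key p x acc hacc, if_neg (by simp [hx])]

-- stability: sorting the filtered list = filtering the sorted list
theorem pv_sorted_filter {α : Type} (key : α → Int) (p : α → Bool) (xs : List α) :
    PySem.List.sorted (xs.filter p) key = (PySem.List.sorted xs key).filter p := by
  rw [PySem.List.sorted_eq_foldl_insertBy, PySem.List.sorted_eq_foldl_insertBy]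
  rw [pv_filter_foldl_ins key p xs [] (by simp)]
  simp

-- ===== VERDICT (by name: the statement is the Claim_ definition above) =====
theorem ordne_nach_alter_spec : Claim_equal_ordne_nach_alter := by
  intro personen _
  unfold Spec_ordne_nach_alter
  simp only [ordne_nach_alter, ordne_nach_alter_alt]
  rw [pv_fold_partition personen [] []]
  simp only [List.nil_append]
  rw [pv_sorted_filter, pv_sorted_filter]
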